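-- pv_equiv track=rewrite | github.com/jiwonpark00/binderScore | score/colabfold_extract_metrics.py | get_chain_mapping
-- ===== SOURCE A (Python) =====
-- def get_chain_mapping(chains, chain_residues):
--     #
--     mapping = {}
--     current_idx = 0
--     #
--     for chain_id in chains:
--         n_res = len(chain_residues[chain_id])
--         mapping[chain_id] = (current_idx, current_idx + n_res)
--         current_idx += n_res
--     #
--     return mapping
-- ===== SOURCE B (Python) =====
-- def get_chain_mapping(chains, chain_residues):
--     # boundary table: bounds[i] = total number of residues of the first i chains
--     bounds = [0]
--     for chain_id in chains:
--         bounds.append(bounds[-1] + len(chain_residues[chain_id]))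
--     return dict(zip(chains, zip(bounds, bounds[1:])))
-- ===== Notes on version B (the rewrite author's own statement) =====
-- stated objective: alternative
-- what changed: Replaces the stateful running-offset loop that inserts into the dict as it goes with a precomputed prefix-sum boundary table, then assembles the dict in one shot by zipping chains with consecutive boundary pairs.
import Mathlib
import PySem

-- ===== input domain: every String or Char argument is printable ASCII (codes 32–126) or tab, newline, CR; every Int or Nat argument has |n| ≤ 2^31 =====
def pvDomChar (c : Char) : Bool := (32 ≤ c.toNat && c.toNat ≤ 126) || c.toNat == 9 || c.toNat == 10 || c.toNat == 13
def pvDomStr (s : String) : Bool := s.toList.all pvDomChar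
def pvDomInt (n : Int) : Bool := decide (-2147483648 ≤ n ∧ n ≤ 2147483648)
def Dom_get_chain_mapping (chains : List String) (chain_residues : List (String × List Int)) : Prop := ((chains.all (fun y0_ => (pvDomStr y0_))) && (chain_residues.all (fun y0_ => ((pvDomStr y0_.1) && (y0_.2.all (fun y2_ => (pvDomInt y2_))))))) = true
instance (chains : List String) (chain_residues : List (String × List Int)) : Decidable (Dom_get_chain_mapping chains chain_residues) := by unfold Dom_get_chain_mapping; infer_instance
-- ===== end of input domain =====

-- B replaces A's running-offset loop (dict filled as the offset advances) with a precomputed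
-- prefix-sum boundary table zipped against the chain list; same cost, different decomposition.

-- ===== PORT A =====
def get_chain_mapping (chains : List String) (chain_residues : List (String × List Int)) : List (String × Int × Int) :=
  let crd := PySem.Dict.ofList chain_residues
  -- under Pre_ every get? is some; the getD [] default is never reached inside Pre_
  let st := chains.foldl
    (fun (st : PySem.Dict String (Int × Int) × Int) chain_id =>
      let n_res : Int := ((crd.get? chain_id).getD []).length
      (st.1.insert chain_id (st.2, st.2 + n_res), st.2 + n_res))
    (PySem.Dict.empty, 0)
  st.1.items

-- ===== PORT B =====
def get_chain_mapping_alt (chains : List String) (chain_residues : List (String × List Int)) : List (String × Int × Int) :=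
  let crd := PySem.Dict.ofList chain_residues
  -- bounds[-1] on the always-nonempty bounds list = getLast!; bounds[1:] = drop 1 (exact here)
  let bounds := chains.foldl
    (fun (bounds : List Int) chain_id =>
      bounds ++ [bounds.getLast! + (((crd.get? chain_id).getD []).length : Int)])
    [(0 : Int)]
  (PySem.Dict.ofList (chains.zip (bounds.zip (bounds.drop 1)))).items

-- ===== PRECONDITION & SPEC =====
-- Pre_ excludes exactly the inputs where Python A raises KeyError: a chain id absent from chain_residues.
def Pre_get_chain_mapping (chains : List String) (chain_residues : List (String × List Int)) : Prop :=
  ∀ c ∈ chains, c ∈ chain_residues.map Prod.fst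
instance (chains : List String) (chain_residues : List (String × List Int)) : Decidable (Pre_get_chain_mapping chains chain_residues) := by unfold Pre_get_chain_mapping; infer_instance

def pvWitness_get_chain_mapping : List String × (List (String × List Int)) :=
  (["A", "B", "A"], [("A", [1, 2]), ("B", [3])])

def Spec_get_chain_mapping (chains : List String) (chain_residues : List (String × List Int)) (out : List (String × Int × Int)) : Prop := out = get_chain_mapping_alt chains chain_residues
instance (chains : List String) (chain_residues : List (String × List Int)) (out : List (String × Int × Int)) : Decidable (Spec_get_chain_mapping chains chain_residues out) := by unfold Spec_get_chain_mapping; infer_instance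

-- ===== CLAIM (what is proved, stated in full; the proofs are below) =====
def Claim_equal_get_chain_mapping : Prop := ∀ (chains : List String) (chain_residues : List (String × List Int)), Dom_get_chain_mapping chains chain_residues → Pre_get_chain_mapping chains chain_residues → Spec_get_chain_mapping chains chain_residues (get_chain_mapping chains chain_residues)

-- ===== LEMMAS AND PROOFS =====

-- per-chain interval list: (c, s, s + f c) with running start s
def pvPl (f : String → Int) (s : Int) : List String → List (String × Int × Int)
  | [] => []
  | c :: cs => (c, s, s + f c) :: pvPl f (s + f c) cs

-- tail of the boundary table after start s
def pvTb (f : String → Int) (s : Int) : List String → List Int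
  | [] => []
  | c :: cs => (s + f c) :: pvTb f (s + f c) cs

theorem pvLemA (f : String → Int) :
    ∀ (cs : List String) (d : PySem.Dict String (Int × Int)) (off : Int),
      (cs.foldl (fun st c => (st.1.insert c (st.2, st.2 + f c), st.2 + f c)) (d, off)).1
        = (pvPl f off cs).foldl (fun d p => d.insert p.1 p.2) d
  | [], d, off => rfl
  | c :: cs, d, off => by
      simp only [List.foldl_cons, pvPl]
      exact pvLemA f cs (d.insert c (off, off + f c)) (off + f c)

theorem pvLemBounds (f : String → Int) :
    ∀ (cs : List String) (acc : List Int) (s : Int),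
      (cs.foldl (fun b c => b ++ [b.getLast! + f c]) (acc ++ [s]))
        = acc ++ [s] ++ pvTb f s cs
  | [], acc, s => by simp [pvTb]
  | c :: cs, acc, s => by
      have h : (acc ++ [s]).getLast! = s := by
        simp [List.getLast!_eq_getLast?_getD]
      simp only [List.foldl_cons, h]
      have := pvLemBounds f cs (acc ++ [s]) (s + f c)
      simp only [this, pvTb]
      simp

theorem pvLemZip (f : String → Int) :
    ∀ (cs : List String) (s : Int),
      cs.zip ((s :: pvTb f s cs).zip (pvTb f s cs)) = pvPl f s cs
  | [], s => by simp [pvTb, pvPl]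
  | c :: cs, s => by
      simp only [pvTb, pvPl, List.zip_cons_cons]
      exact congrArg _ (pvLemZip f cs (s + f c))

-- ===== VERDICT (by name: the statement is the Claim_ definition above) =====
theorem get_chain_mapping_spec : Claim_equal_get_chain_mapping := by
  intro chains chain_residues _ _
  unfold Spec_get_chain_mapping get_chain_mapping get_chain_mapping_alt
  have hb := pvLemBounds (fun c => ((((PySem.Dict.ofList chain_residues).get? c).getD []).length : Int)) chains [] 0
  have hz := pvLemZip (fun c => ((((PySem.Dict.ofList chain_residues).get? c).getD []).length : Int)) chains 0
  have ha := pvLemA (fun c => ((((PySem.Dict.ofList chain_residues).get? c).getD []).length : Int)) chains PySem.Dict.empty 0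
  simp only [List.nil_append, List.singleton_append] at hb hz ha ⊢
  rw [hb, List.drop_succ_cons, List.drop_zero, hz, ha]
  rfl
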